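-- pv_equiv track=rewrite | github.com/UMBC-CMSC-Hamilton/cmsc201fall23 | final_review_1pm.py | a_distance_three
-- ===== SOURCE A (Python) =====
-- def a_distance_three(message):
--     indices = []
--     for i in range(len(message)):
--         if message[i] == 'a':
--             indices.append(i)
--
--     min_dist = len(message) + 1
--     for j in range(len(indices) - 1):
--         if indices[j + 1] - indices[j] < min_dist:
--             min_dist = indices[j + 1] - indices[j]
--
--     return min_dist
-- ===== SOURCE B (Python) =====
-- def a_distance_three(message):
--     prev = None
--     min_dist = len(message) + 1
--     for i, ch in enumerate(message):
--         if ch == 'a':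
--             if prev is not None and i - prev < min_dist:
--                 min_dist = i - prev
--             prev = i
--     return min_dist
-- ===== Notes on version B (the rewrite author's own statement) =====
-- stated objective: simpler
-- what changed: Replaces the build-an-index-list-then-scan-adjacent-pairs two-pass approach with a single running-state scan over the characters that tracks the index of the previously seen target character and the minimum gap so far.
import Mathlib
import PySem

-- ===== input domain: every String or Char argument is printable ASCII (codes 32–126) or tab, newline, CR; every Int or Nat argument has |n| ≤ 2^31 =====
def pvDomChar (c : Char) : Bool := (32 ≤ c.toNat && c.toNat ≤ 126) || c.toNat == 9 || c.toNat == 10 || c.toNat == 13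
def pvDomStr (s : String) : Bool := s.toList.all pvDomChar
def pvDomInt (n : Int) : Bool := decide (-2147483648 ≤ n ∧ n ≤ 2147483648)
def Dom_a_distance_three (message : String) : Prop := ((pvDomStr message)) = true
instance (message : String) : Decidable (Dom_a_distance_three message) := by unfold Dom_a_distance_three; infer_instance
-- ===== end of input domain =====

-- B replaces A's two passes (collect all 'a' indices, then scan adjacent pairs) by one
-- running-state scan tracking the previous 'a' index and the minimum gap; return values proved equal.

-- ===== PORT A =====
-- first loop of A: for i in range(len(message)): if message[i] == 'a': indices.append(i)
-- (message[i] is always indexed in range here, so pyGetD is exact: no IndexError possible)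
def pvIndicesA (cs : List Char) : List Int :=
  (PySem.List.pyRange 0 (PySem.List.len cs) 1).foldl
    (fun acc i => if PySem.List.pyGetD cs i ' ' = 'a' then acc ++ [i] else acc) []

-- second loop of A: for j in range(len(indices) - 1): update min_dist (indices[j] always in range)
def pvMinDistA (indices : List Int) (md0 : Int) : Int :=
  (PySem.List.pyRange 0 (PySem.List.len indices - 1) 1).foldl
    (fun md j =>
      if PySem.List.pyGetD indices (j + 1) 0 - PySem.List.pyGetD indices j 0 < md then
        PySem.List.pyGetD indices (j + 1) 0 - PySem.List.pyGetD indices j 0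
      else md)
    md0

def a_distance_three (message : String) : Int :=
  pvMinDistA (pvIndicesA message.toList) (PySem.Str.len message + 1)

-- ===== PORT B =====
def a_distance_three_alt (message : String) : Int :=
  ((PySem.List.enumerate message.toList 0).foldl
    (fun (st : Option Int × Int) p =>
      if p.2 = 'a' then
        (some p.1,
          match st.1 with
          | some q => if p.1 - q < st.2 then p.1 - q else st.2
          | none => st.2)
      else st)
    (none, PySem.Str.len message + 1)).2

-- ===== PRECONDITION & SPEC =====
def Spec_a_distance_three (message : String) (out : Int) : Prop := out = a_distance_three_alt message
instance (message : String) (out : Int) : Decidable (Spec_a_distance_three message out) := by unfold Spec_a_distance_three; infer_instance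

-- ===== CLAIM (what is proved, stated in full; the proofs are below) =====
def Claim_equal_a_distance_three : Prop := ∀ (message : String), Dom_a_distance_three message → Spec_a_distance_three message (a_distance_three message)

-- ===== LEMMAS AND PROOFS =====

-- the common pair-step: see an 'a' at index j, update (previous 'a' index, min gap so far)
def pvStep (st : Option Int × Int) (j : Int) : Option Int × Int :=
  (some j, match st.1 with
           | some q => if j - q < st.2 then j - q else st.2
           | none => st.2)

-- indices (counting from s) of the 'a' characters of a char list
def pvAIdx : List Char → Int → List Int
  | [], _ => []
  | c :: t, s => if c = 'a' then s :: pvAIdx t (s + 1) else pvAIdx t (s + 1)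

lemma pvIdx_fold (cs : List Char) (s : Int) (acc : List Int) :
    (PySem.List.enumerate cs s).foldl
      (fun acc p => if p.2 = 'a' then acc ++ [p.1] else acc) acc = acc ++ pvAIdx cs s := by
  induction cs generalizing s acc with
  | nil => simp [PySem.List.enumerate_nil, pvAIdx]
  | cons c t ih =>
      rw [PySem.List.enumerate_cons]
      simp only [List.foldl_cons, pvAIdx]
      by_cases hc : c = 'a' <;> simp [hc, ih, List.append_assoc]

lemma pvIndicesA_eq (cs : List Char) : pvIndicesA cs = pvAIdx cs 0 := by
  have h := pvIdx_fold cs 0 []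
  rw [PySem.List.enumerate_eq_map_pyRange cs ' ', List.foldl_map] at h
  simpa [pvIndicesA] using h

lemma pvEnum_fold (cs : List Char) (s : Int) (st : Option Int × Int) :
    (PySem.List.enumerate cs s).foldl
      (fun (st : Option Int × Int) p =>
        if p.2 = 'a' then
          (some p.1,
            match st.1 with
            | some q => if p.1 - q < st.2 then p.1 - q else st.2
            | none => st.2)
        else st) st
    = (pvAIdx cs s).foldl pvStep st := by
  induction cs generalizing s st with
  | nil => simp [PySem.List.enumerate_nil, pvAIdx]
  | cons c t ih =>
      rw [PySem.List.enumerate_cons]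
      simp only [List.foldl_cons, pvAIdx]
      by_cases hc : c = 'a' <;> simp [hc, ih, pvStep]

lemma pvZip_map_range (l : List Int) :
    (PySem.List.pyRange 0 ((l.length : Int) - 1) 1).map
      (fun j => (PySem.List.pyGetD l j 0, PySem.List.pyGetD l (j + 1) 0)) = l.zip l.tail := by
  rw [PySem.List.pyRange_one, List.map_map]
  apply List.ext_getElem
  · simp [List.length_zip]
  · intro i h1 h2
    simp only [List.getElem_map, List.getElem_range, Function.comp_apply, List.getElem_zip]
    have hi : i < l.length - 1 := by
      simpa [List.length_zip] using h2
    rw [show (0 : Int) + (i : Int) = ((i : Nat) : Int) from by omega,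
      show ((i : Nat) : Int) + 1 = ((i + 1 : Nat) : Int) from by push_cast; ring,
      PySem.List.pyGetD_natCast, PySem.List.pyGetD_natCast]
    have ht : l.tail[i]'(by simpa [List.length_zip] using h2) = l[i + 1]'(by omega) :=
      List.getElem_tail ..
    rw [ht, List.getD_eq_getElem _ _ (by omega), List.getD_eq_getElem _ _ (by omega)]

lemma pvPair_fold (t : List Int) (a m : Int) :
    (((a :: t).zip t).foldl (fun md p => if p.2 - p.1 < md then p.2 - p.1 else md) m)
    = (t.foldl pvStep (some a, m)).2 := by
  induction t generalizing a m with
  | nil => simp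
  | cons b t' ih =>
      simp only [List.zip_cons_cons, List.foldl_cons]
      rw [ih]
      rfl

lemma pvChain (l : List Int) (m : Int) :
    ((l.zip l.tail).foldl (fun md p => if p.2 - p.1 < md then p.2 - p.1 else md) m)
    = (l.foldl pvStep (none, m)).2 := by
  cases l with
  | nil => simp
  | cons a t =>
      simp only [List.tail_cons, List.foldl_cons]
      rw [pvPair_fold]
      rfl

lemma pvMinDistA_eq (l : List Int) (m : Int) : pvMinDistA l m = (l.foldl pvStep (none, m)).2 := by
  rw [← pvChain, ← pvZip_map_range, List.foldl_map]
  simp [pvMinDistA, PySem.List.len]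

-- ===== VERDICT (by name: the statement is the Claim_ definition above) =====
theorem a_distance_three_spec : Claim_equal_a_distance_three := by
  intro message _
  show a_distance_three message = a_distance_three_alt message
  unfold a_distance_three a_distance_three_alt
  rw [pvEnum_fold, pvIndicesA_eq, pvMinDistA_eq]
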